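-- pv_equiv track=rewrite | github.com/eddycobri/data_science | challenge2/finding_influencer.py | attribut_partition
-- ===== SOURCE A (Python) =====
-- def attribut_partition (graph, attribut):
--     new_dict={}
--     diction=attribut
--     list_of_all_attribut=[]
--     for k,val in attribut.items():
--         for i in val:
--             if not i in list_of_all_attribut:
--                 list_of_all_attribut.append(i)
--     match=0  #just pour faire le remplissage
--
--     for  i in list_of_all_attribut:
--         new_dict[i] = match
--         match+=1
--     for k,val in attribut.items():
--         for i in val:
--             if i in new_dict:
--                 diction[k]= new_dict[i]
--
--     return diction
-- ===== SOURCE B (Python) =====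
-- # Single fused pass: build the first-appearance index incrementally with len(index)
-- # and assign each key's value immediately, instead of A's three separate passes
-- # (dedup list, index-numbering loop, assignment loop). Mutates `attribut` in place,
-- # exactly as A does through its `diction` alias.
-- def attribut_partition(graph, attribut):
--     index = {}
--     for k in list(attribut):
--         val = attribut[k]
--         last = None
--         for i in val:
--             if i not in index:
--                 index[i] = len(index)
--             last = i
--         if last is not None:
--             attribut[k] = index[last]
--     return attribut
-- ===== Notes on version B (the rewrite author's own statement) =====
-- stated objective: faster
-- what changed: B fuses A's three passes (O(m) membership scans of a growing dedup list, a numbering loop, a re-walk assigning each key) into one traversal that numbers attributes on first sight via len(index) in a hash dict and assigns each key's result immediately.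
-- outside the precondition, e.g. on attribut_partition({}, {'a': []}): A returns {'a': []}, B returns {'a': []}
import Mathlib
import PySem

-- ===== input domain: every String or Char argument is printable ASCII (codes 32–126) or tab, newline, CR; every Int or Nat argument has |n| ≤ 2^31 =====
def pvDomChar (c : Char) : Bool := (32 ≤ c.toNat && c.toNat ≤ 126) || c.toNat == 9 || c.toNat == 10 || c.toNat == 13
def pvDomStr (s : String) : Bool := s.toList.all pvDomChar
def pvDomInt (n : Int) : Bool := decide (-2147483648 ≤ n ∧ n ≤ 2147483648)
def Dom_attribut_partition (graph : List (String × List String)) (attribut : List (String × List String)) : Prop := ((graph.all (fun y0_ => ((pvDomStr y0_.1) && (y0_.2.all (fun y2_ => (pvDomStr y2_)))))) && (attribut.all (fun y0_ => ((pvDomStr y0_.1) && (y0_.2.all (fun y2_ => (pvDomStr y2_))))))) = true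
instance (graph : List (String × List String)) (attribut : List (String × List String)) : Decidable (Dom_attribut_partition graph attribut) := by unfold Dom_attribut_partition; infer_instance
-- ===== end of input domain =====

-- B fuses A's three passes into a single traversal (equivalence is about the returned
-- dict; both Pythons mutate `attribut` in place identically on Pre_).

-- ===== PORT A =====
-- Literal port of A. Python's `diction` is the `attribut` dict itself; under
-- Pre_ (distinct keys, no empty value list) every key is overwritten with an int in
-- its original position, which is exactly what the insert-fold from an empty dict builds.
def attribut_partition (graph : List (String × List String)) (attribut : List (String × List String)) : List (String × Int) :=
  let list_of_all_attribut : List String :=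
    attribut.foldl (fun acc kv =>
      kv.2.foldl (fun acc i => if acc.contains i then acc else acc ++ [i]) acc) []
  let nd : PySem.Dict String Int × Int :=
    list_of_all_attribut.foldl (fun p i => (p.1.insert i p.2, p.2 + 1)) (PySem.Dict.empty, 0)
  let new_dict := nd.1
  let diction : PySem.Dict String Int :=
    attribut.foldl (fun d kv =>
      kv.2.foldl (fun d i =>
        if new_dict.contains i then d.insert kv.1 (new_dict.getD i 0) else d) d)
      PySem.Dict.empty
  diction.items

-- ===== PORT B =====
-- Literal port of Source B: one pass; `index` numbers attributes on first sight with
-- len(index); each key is assigned index[last] right away (skipped when val is empty).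
def attribut_partition_alt (graph : List (String × List String)) (attribut : List (String × List String)) : List (String × Int) :=
  (attribut.foldl
    (fun (st : PySem.Dict String Int × PySem.Dict String Int) kv =>
      let r := kv.2.foldl
        (fun (p : PySem.Dict String Int × Option String) i =>
          (if p.1.contains i then p.1 else p.1.insert i (p.1.size : Int), some i))
        (st.1, none)
      match r.2 with
      | some last => (r.1, st.2.insert kv.1 (r.1.getD last 0))
      | none => (r.1, st.2))
    (PySem.Dict.empty, PySem.Dict.empty)).2.items

-- ===== PRECONDITION & SPEC =====
-- Pre_ excludes attribut with an empty value list (A leaves that key bound to the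
-- list itself, not an int — no value of the declared type) and association lists with
-- duplicate keys (not representable as a Python dict argument).
def Pre_attribut_partition (graph : List (String × List String)) (attribut : List (String × List String)) : Prop :=
  (attribut.map (·.1)).Nodup ∧ ∀ kv ∈ attribut, kv.2 ≠ []
instance (graph : List (String × List String)) (attribut : List (String × List String)) : Decidable (Pre_attribut_partition graph attribut) := by unfold Pre_attribut_partition; infer_instance

def pvWitness_attribut_partition : (List (String × List String)) × (List (String × List String)) :=
  ([], [("a", ["x", "y"]), ("b", ["y"])])

def Spec_attribut_partition (graph : List (String × List String)) (attribut : List (String × List String)) (out : List (String × Int)) : Prop := out = attribut_partition_alt graph attribut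
instance (graph : List (String × List String)) (attribut : List (String × List String)) (out : List (String × Int)) : Decidable (Spec_attribut_partition graph attribut out) := by unfold Spec_attribut_partition; infer_instance

-- ===== CLAIM (what is proved, stated in full; the proofs are below) =====
def Claim_equal_attribut_partition : Prop := ∀ (graph : List (String × List String)) (attribut : List (String × List String)), Dom_attribut_partition graph attribut → Pre_attribut_partition graph attribut → Spec_attribut_partition graph attribut (attribut_partition graph attribut)

-- ===== LEMMAS AND PROOFS =====

-- insertion-order dedup step over one value list / over a whole item list (shared shape of both ports' scans)
def pvDD (M : List String) (xs : List String) : List String :=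
  xs.foldl (fun acc i => if acc.contains i then acc else acc ++ [i]) M

def pvDDK (M : List String) (rest : List (String × List String)) : List String :=
  rest.foldl (fun M kv => pvDD M kv.2) M

-- the dict d numbers exactly the elements of M with their positions
def pvInv (d : PySem.Dict String Int) (M : List String) : Prop :=
  d.size = M.length ∧ ∀ x : String, d.get? x = if x ∈ M then some ((M.idxOf x : Int)) else none

theorem pvDD_cons (M : List String) (x : String) (xs : List String) :
    pvDD M (x :: xs) = pvDD (if M.contains x then M else M ++ [x]) xs := rfl

-- dedup-fold only ever appends
theorem pvDD_prefix (xs M : List String) : M <+: pvDD M xs := by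
  induction xs generalizing M with
  | nil => exact List.prefix_rfl
  | cons x xs ih =>
    rw [pvDD_cons]
    by_cases h : M.contains x
    · rw [if_pos h]; exact ih M
    · rw [if_neg h]; exact (List.prefix_append M [x]).trans (ih (M ++ [x]))

theorem pvDDK_prefix (rest : List (String × List String)) (M : List String) :
    M <+: pvDDK M rest := by
  induction rest generalizing M with
  | nil => exact List.prefix_rfl
  | cons kv rest ih =>
    exact (pvDD_prefix kv.2 M).trans (ih (pvDD M kv.2))

theorem pvDD_mem (xs M : List String) (a : String) (h : a ∈ xs) : a ∈ pvDD M xs := by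
  induction xs generalizing M with
  | nil => cases h
  | cons x xs ih =>
    rw [pvDD_cons]
    rcases List.mem_cons.1 h with rfl | h
    · by_cases hc : M.contains a
      · rw [if_pos hc]
        exact (pvDD_prefix xs M).subset (List.contains_iff_mem.1 hc)
      · rw [if_neg hc]
        exact (pvDD_prefix xs (M ++ [a])).subset (by simp)
    · by_cases hc : M.contains x
      · rw [if_pos hc]; exact ih _ h
      · rw [if_neg hc]; exact ih _ h

theorem pvDD_nodup (xs M : List String) (h : M.Nodup) : (pvDD M xs).Nodup := by
  induction xs generalizing M with
  | nil => exact h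
  | cons x xs ih =>
    rw [pvDD_cons]
    by_cases hc : M.contains x
    · rw [if_pos hc]; exact ih M h
    · rw [if_neg hc]
      have hx : x ∉ M := fun hm => hc (List.contains_iff_mem.2 hm)
      exact ih (M ++ [x]) (by
        simp only [List.nodup_append, List.nodup_singleton, true_and, h]
        intro a ha b hb
        simp only [List.mem_singleton] at hb
        subst hb
        exact fun he => hx (he ▸ ha))

theorem pvDDK_nodup (rest : List (String × List String)) (M : List String) (h : M.Nodup) :
    (pvDDK M rest).Nodup := by
  induction rest generalizing M with
  | nil => exact h
  | cons kv rest ih => exact ih _ (pvDD_nodup kv.2 M h)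

theorem pvInv_empty : pvInv PySem.Dict.empty [] := by
  constructor
  · simp [PySem.Dict.size_empty]
  · intro x; simp [PySem.Dict.get?_empty]

theorem pvInv_contains {d : PySem.Dict String Int} {M : List String}
    (h : pvInv d M) (x : String) : d.contains x = decide (x ∈ M) := by
  rw [PySem.Dict.contains_eq_isSome_get?, h.2 x]
  by_cases hx : x ∈ M <;> simp [hx]

theorem pvInv_getD {d : PySem.Dict String Int} {M : List String}
    (h : pvInv d M) {x : String} (hx : x ∈ M) : d.getD x 0 = (M.idxOf x : Int) := by
  rw [PySem.Dict.getD_eq_get?_getD, h.2 x]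
  simp [hx]

theorem pvInv_insert {d : PySem.Dict String Int} {M : List String}
    (h : pvInv d M) {i : String} (hi : i ∉ M) :
    pvInv (d.insert i (M.length : Int)) (M ++ [i]) := by
  constructor
  · rw [PySem.Dict.size_insert, pvInv_contains h]
    simp [hi, h.1]
  · intro x
    rw [PySem.Dict.get?_insert, h.2 x]
    by_cases hxi : x = i
    · subst hxi
      simp [List.idxOf_append_of_notMem hi, hi]
    · by_cases hxM : x ∈ M
      · simp [hxi, hxM, List.idxOf_append_of_mem hxM]
      · simp [hxi, hxM]

-- A's numbering loop: counter fold builds exactly the position dict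
theorem pvInv_numFold (M : List String) : ∀ (d : PySem.Dict String Int) (N : List String),
    pvInv d N → (∀ x ∈ M, x ∉ N) → M.Nodup →
    pvInv ((M.foldl (fun p i => (p.1.insert i p.2, p.2 + 1)) (d, (N.length : Int))).1) (N ++ M) := by
  induction M with
  | nil => intro d N h _ _; simpa using h
  | cons i M ih =>
    intro d N h hfresh hnd
    have hiN : i ∉ N := hfresh i (by simp)
    have h' : pvInv (d.insert i ((N.length : Int))) (N ++ [i]) := pvInv_insert h hiN
    have hfresh' : ∀ x ∈ M, x ∉ N ++ [i] := by
      intro x hx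
      simp only [List.mem_append, List.mem_singleton]
      rintro (hxN | rfl)
      · exact hfresh x (by simp [hx]) hxN
      · exact (List.nodup_cons.1 hnd).1 hx
    have hcast : (N.length : Int) + 1 = ((N ++ [i]).length : Int) := by
      simp [List.length_append]
    have hstep := ih (d.insert i ((N.length : Int))) (N ++ [i]) h' hfresh' (List.nodup_cons.1 hnd).2
    rw [List.foldl_cons, hcast]
    simpa [List.append_assoc] using hstep

-- B's inner loop, split into its dict part and its `last` part
theorem pvBfold (xs : List String) : ∀ (d : PySem.Dict String Int) (o : Option String),
    xs.foldl (fun p i => (if p.1.contains i then p.1 else p.1.insert i ((p.1.size : Int)), some i)) (d, o)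
    = (xs.foldl (fun d i => if d.contains i then d else d.insert i ((d.size : Int))) d, xs.getLast?.or o) := by
  induction xs with
  | nil => intro d o; simp
  | cons x xs ih =>
    intro d o
    rw [List.foldl_cons, List.foldl_cons, ih]
    congr 1
    cases xs with
    | nil => simp
    | cons y ys =>
      rw [List.getLast?_cons_cons]
      obtain ⟨l, hl⟩ := Option.isSome_iff_exists.1 (List.getLast?_isSome.2 (List.cons_ne_nil y ys))
      simp [hl]

-- B's incremental numbering maintains the position-dict invariant along the dedup list
theorem pvInv_Bfold (xs : List String) : ∀ (d : PySem.Dict String Int) (M : List String),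
    pvInv d M →
    pvInv (xs.foldl (fun d i => if d.contains i then d else d.insert i ((d.size : Int))) d) (pvDD M xs) := by
  induction xs with
  | nil => intro d M h; exact h
  | cons x xs ih =>
    intro d M h
    rw [List.foldl_cons, pvDD_cons, pvInv_contains h]
    by_cases hx : x ∈ M
    · have hMc : M.contains x = true := List.contains_iff_mem.2 hx
      simp only [hx, decide_true, if_pos, hMc]
      exact ih d M h
    · have hMc : ¬ M.contains x = true := fun hc => hx (List.contains_iff_mem.1 hc)
      simp only [hx, decide_false, if_neg, hMc, Bool.false_eq_true, not_false_eq_true]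
      have hsz : ((d.size : Int)) = ((M.length : Int)) := by rw [h.1]
      rw [hsz]
      exact ih _ _ (pvInv_insert h hx)

-- A's assignment loop over one key's values collapses to one insert of the last value's index
theorem pvAout (k : String) (nd : PySem.Dict String Int) (L : List String)
    (hnd : pvInv nd L) (xs : List String) : ∀ (d : PySem.Dict String Int), (∀ i ∈ xs, i ∈ L) →
    xs.foldl (fun d i => if nd.contains i then d.insert k (nd.getD i 0) else d) d
    = (match xs.getLast? with
       | none => d
       | some l => d.insert k ((L.idxOf l : Int))) := by
  induction xs with
  | nil => intro d _; rfl
  | cons x xs ih =>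
    intro d hmem
    have hxL : x ∈ L := hmem x (by simp)
    have hc : nd.contains x = true := by
      rw [pvInv_contains hnd]; simp [hxL]
    rw [List.foldl_cons, if_pos hc, pvInv_getD hnd hxL,
        ih (d.insert k ((L.idxOf x : Int))) (fun i hi => hmem i (by simp [hi]))]
    cases hxs : xs.getLast? with
    | none =>
      have : xs = [] := List.getLast?_eq_none_iff.1 hxs
      subst this; rfl
    | some l =>
      cases xs with
      | nil => simp at hxs
      | cons y ys =>
        rw [List.getLast?_cons_cons, hxs]
        simp [PySem.Dict.insert_insert_self]

-- the main loop correspondence: A's assignment pass (with the precomputed position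
-- dict) equals B's fused pass, given the invariants
theorem pvMain (rest : List (String × List String)) :
    ∀ (M : List String) (idx out nd : PySem.Dict String Int) (L : List String),
    pvInv idx M → pvInv nd L → L = pvDDK M rest →
    rest.foldl (fun d kv => kv.2.foldl
        (fun d i => if nd.contains i then d.insert kv.1 (nd.getD i 0) else d) d) out
    = (rest.foldl
        (fun (st : PySem.Dict String Int × PySem.Dict String Int) kv =>
          let r := kv.2.foldl
            (fun (p : PySem.Dict String Int × Option String) i =>
              (if p.1.contains i then p.1 else p.1.insert i ((p.1.size : Int)), some i))
            (st.1, none)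
          match r.2 with
          | some last => (r.1, st.2.insert kv.1 (r.1.getD last 0))
          | none => (r.1, st.2)) (idx, out)).2 := by
  induction rest with
  | nil => intro M idx out nd L _ _ _; rfl
  | cons kv rest ih =>
    intro M idx out nd L hidx hnd hL
    have hL' : L = pvDDK (pvDD M kv.2) rest := hL
    have hpre : pvDD M kv.2 <+: L := hL' ▸ pvDDK_prefix rest (pvDD M kv.2)
    have hmem : ∀ i ∈ kv.2, i ∈ L := fun i hi => hpre.subset (pvDD_mem kv.2 M i hi)
    have hidx' : pvInv (kv.2.foldl (fun d i => if d.contains i then d else d.insert i ((d.size : Int))) idx) (pvDD M kv.2) :=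
      pvInv_Bfold kv.2 idx M hidx
    rw [List.foldl_cons, List.foldl_cons,
        pvAout kv.1 nd L hnd kv.2 out hmem]
    simp only [pvBfold kv.2 idx none, Option.or_none]
    cases hlast : kv.2.getLast? with
    | none =>
      dsimp only
      exact ih (pvDD M kv.2) _ out nd L hidx' hnd hL'
    | some l =>
      have hlmem : l ∈ pvDD M kv.2 := pvDD_mem kv.2 M l (List.mem_of_getLast? hlast)
      have hval : (kv.2.foldl (fun d i => if d.contains i then d else d.insert i ((d.size : Int))) idx).getD l 0
          = ((L.idxOf l : Int)) := by
        rw [pvInv_getD hidx' hlmem, List.IsPrefix.idxOf_eq_of_mem hpre hlmem]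
      dsimp only
      rw [hval]
      exact ih (pvDD M kv.2) _ _ nd L hidx' hnd hL'

theorem pvPorts_eq (graph : List (String × List String)) (attribut : List (String × List String)) :
    attribut_partition graph attribut = attribut_partition_alt graph attribut := by
  have hndL : (pvDDK [] attribut).Nodup := pvDDK_nodup attribut [] List.nodup_nil
  have hnum := pvInv_numFold (pvDDK [] attribut) PySem.Dict.empty [] pvInv_empty
      (fun x _ hx => (List.not_mem_nil).elim hx) hndL
  simp only [List.nil_append, List.length_nil, Nat.cast_zero] at hnum
  exact congrArg PySem.Dict.items
    (pvMain attribut [] PySem.Dict.empty PySem.Dict.empty _ _ pvInv_empty hnum rfl)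

-- ===== VERDICT (by name: the statement is the Claim_ definition above) =====
theorem attribut_partition_spec : Claim_equal_attribut_partition := by
  intro graph attribut _ _
  exact pvPorts_eq graph attribut
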